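-- pv_equiv track=rewrite | github.com/devdo-eu/macau | logic/logic.py | active_card_possible_plays
-- ===== SOURCE A (Python) =====
-- colors = 'hearts tiles clovers pikes'.split()
--
-- values = '2 3 4 5 6 7 8 9 10 J Q K A'.split()
--
-- def active_card_possible_plays(hand, top_card, requested_color=None, requested_value=None):
--     """
--     Function used to evaluate possible plays for given hand and special card from top of table.
--     :param hand: list of cards on player hand
--     :param top_card: tuple with card on top of a table
--     :param requested_color: string with requested color
--     :param requested_value: string with requested value
--     :return: list of possible plays, bool value if there is any move
--     """
--     attack = False
--     possible_plays, req_value, req_color, from_color = [], [], [], []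
--     from_value = [(color, top_card[1]) for color in colors]
--     if top_card[1] in '2 3 K'.split():
--         from_color = [(top_card[0], value) for value in '2 3 K'.split()]
--         attack = True
--
--     if requested_value:
--         req_value = [(color, requested_value) for color in colors]
--     elif top_card[1] == 'J':
--         req_color = [(top_card[0], value) for value in values]
--
--     if requested_color:
--         req_color = [(requested_color, value) for value in values]
--     elif top_card[1] == 'A':
--         req_color = [(top_card[0], value) for value in values]
--
--     [possible_plays.append(card) for card in hand if card in req_color + req_value + from_value + from_color]
--     [possible_plays.remove(king) for king in [('tiles', 'K'), ('clovers', 'K')] if king in possible_plays and attack]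
--
--     return possible_plays, len(possible_plays) > 0
-- ===== SOURCE B (Python) =====
-- colors = 'hearts tiles clovers pikes'.split()
--
-- values = '2 3 4 5 6 7 8 9 10 J Q K A'.split()
--
-- ATTACK = ('2', '3', 'K')
--
--
-- def active_card_possible_plays(hand, top_card, requested_color=None, requested_value=None):
--     color, value = top_card
--
--     def playable(card):
--         c, v = card
--         if v == value and c in colors:
--             return True
--         if value in ATTACK and c == color and v in ATTACK:
--             return True
--         if requested_value and v == requested_value and c in colors:
--             return True
--         if requested_color:
--             ok = c == requested_color
--         elif value == 'A':
--             ok = c == color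
--         elif value == 'J' and not requested_value:
--             ok = c == color
--         else:
--             ok = False
--         return ok and v in values
--
--     possible_plays = [card for card in hand if playable(card)]
--     if value in ATTACK:
--         for king in (('tiles', 'K'), ('clovers', 'K')):
--             if king in possible_plays:
--                 possible_plays.remove(king)
--     return possible_plays, len(possible_plays) > 0
-- ===== Notes on version B (the rewrite author's own statement) =====
-- stated objective: simpler
-- what changed: A builds four candidate-tuple lists (req_color/req_value/from_value/from_color) and tests each card by membership in their concatenation; B drops the lists entirely and decides each card with a direct per-card predicate encoding the same rules, filtering the hand in one pass.
import Mathlib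
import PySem

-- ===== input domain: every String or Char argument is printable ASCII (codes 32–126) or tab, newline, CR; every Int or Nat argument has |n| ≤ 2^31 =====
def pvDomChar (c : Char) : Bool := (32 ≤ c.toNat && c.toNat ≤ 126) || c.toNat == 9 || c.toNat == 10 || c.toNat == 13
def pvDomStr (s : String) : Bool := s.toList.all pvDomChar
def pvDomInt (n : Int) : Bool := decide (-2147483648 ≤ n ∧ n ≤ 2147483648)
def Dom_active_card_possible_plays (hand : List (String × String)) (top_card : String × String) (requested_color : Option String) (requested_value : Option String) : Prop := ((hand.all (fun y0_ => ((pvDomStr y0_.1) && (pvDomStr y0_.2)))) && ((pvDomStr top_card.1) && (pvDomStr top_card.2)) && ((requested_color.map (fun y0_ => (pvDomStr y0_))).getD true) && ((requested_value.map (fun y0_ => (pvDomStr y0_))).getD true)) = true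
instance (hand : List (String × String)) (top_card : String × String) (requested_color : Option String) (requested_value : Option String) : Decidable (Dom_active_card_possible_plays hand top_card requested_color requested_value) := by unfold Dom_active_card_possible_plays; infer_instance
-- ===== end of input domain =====

-- B replaces A's four candidate-tuple lists and membership scan by one direct per-card predicate (a different decomposition of the same rules); return value proved equal.

-- module-level constants shared by Source A and Source B
def pyColors : List String := ["hearts", "tiles", "clovers", "pikes"]
def pyValues : List String := ["2", "3", "4", "5", "6", "7", "8", "9", "10", "J", "Q", "K", "A"]
-- Python truthiness of an optional string argument (None and '' are falsy)
def pyTruthy (o : Option String) : Bool := match o with | none => false | some s => !(s == "")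

-- ===== PORT A =====
def active_card_possible_plays (hand : List (String × String)) (top_card : String × String) (requested_color : Option String) (requested_value : Option String) : (List (String × String)) × Bool :=
  let attack := false
  let req_value : List (String × String) := []
  let req_color : List (String × String) := []
  let from_color : List (String × String) := []
  let from_value := pyColors.map (fun color => (color, top_card.2))
  let fa := if (["2", "3", "K"] : List String).contains top_card.2 then
              ((["2", "3", "K"] : List String).map (fun value => (top_card.1, value)), true)
            else (from_color, attack)
  let from_color := fa.1
  let attack := fa.2
  let rvc := if pyTruthy requested_value then
               (pyColors.map (fun color => (color, requested_value.getD "")), req_color)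
             else if top_card.2 == "J" then
               (req_value, pyValues.map (fun value => (top_card.1, value)))
             else (req_value, req_color)
  let req_value := rvc.1
  let req_color := rvc.2
  let req_color := if pyTruthy requested_color then
                     pyValues.map (fun value => (requested_color.getD "", value))
                   else if top_card.2 == "A" then
                     pyValues.map (fun value => (top_card.1, value))
                   else req_color
  let possible_plays := hand.filter (fun card => (req_color ++ req_value ++ from_value ++ from_color).contains card)
  let possible_plays := if possible_plays.contains ("tiles", "K") && attack then
                          (PySem.List.remove? possible_plays ("tiles", "K")).getD possible_plays
                        else possible_plays
  let possible_plays := if possible_plays.contains ("clovers", "K") && attack then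
                          (PySem.List.remove? possible_plays ("clovers", "K")).getD possible_plays
                        else possible_plays
  (possible_plays, decide (possible_plays.length > 0))

-- ===== PORT B =====
def pyPlayable (color value : String) (requested_color : Option String) (requested_value : Option String) (card : String × String) : Bool :=
  let c := card.1
  let v := card.2
  if v == value && pyColors.contains c then true
  else if (["2", "3", "K"] : List String).contains value && c == color && (["2", "3", "K"] : List String).contains v then true
  else if pyTruthy requested_value && v == requested_value.getD "" && pyColors.contains c then true
  else
    (if pyTruthy requested_color then c == requested_color.getD ""
     else if value == "A" then c == color
     else if value == "J" && !pyTruthy requested_value then c == color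
     else false) && pyValues.contains v

def active_card_possible_plays_alt (hand : List (String × String)) (top_card : String × String) (requested_color : Option String) (requested_value : Option String) : (List (String × String)) × Bool :=
  let possible_plays := hand.filter (pyPlayable top_card.1 top_card.2 requested_color requested_value)
  let possible_plays :=
    if (["2", "3", "K"] : List String).contains top_card.2 then
      let p1 := if possible_plays.contains ("tiles", "K") then
                  (PySem.List.remove? possible_plays ("tiles", "K")).getD possible_plays
                else possible_plays
      if p1.contains ("clovers", "K") then
        (PySem.List.remove? p1 ("clovers", "K")).getD p1
      else p1
    else possible_plays
  (possible_plays, decide (possible_plays.length > 0))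

-- ===== PRECONDITION & SPEC =====
def Spec_active_card_possible_plays (hand : List (String × String)) (top_card : String × String) (requested_color : Option String) (requested_value : Option String) (out : (List (String × String)) × Bool) : Prop := out = active_card_possible_plays_alt hand top_card requested_color requested_value
instance (hand : List (String × String)) (top_card : String × String) (requested_color : Option String) (requested_value : Option String) (out : (List (String × String)) × Bool) : Decidable (Spec_active_card_possible_plays hand top_card requested_color requested_value out) := by unfold Spec_active_card_possible_plays; infer_instance

-- ===== CLAIM (what is proved, stated in full; the proofs are below) =====
def Claim_equal_active_card_possible_plays : Prop := ∀ (hand : List (String × String)) (top_card : String × String) (requested_color : Option String) (requested_value : Option String), Dom_active_card_possible_plays hand top_card requested_color requested_value → Spec_active_card_possible_plays hand top_card requested_color requested_value (active_card_possible_plays hand top_card requested_color requested_value)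

-- ===== LEMMAS AND PROOFS =====

theorem mem_map_fst (l : List String) (y c v : String) :
    ((l.map (fun x => (x, y))).contains (c, v) = true) ↔ (c ∈ l ∧ v = y) := by
  simp [List.mem_map, Prod.ext_iff]; tauto

theorem mem_map_snd (l : List String) (x c v : String) :
    ((l.map (fun w => (x, w))).contains (c, v) = true) ↔ (c = x ∧ v ∈ l) := by
  simp [List.mem_map, Prod.ext_iff]; tauto

-- membership in A's (overwritten) req_color list, branch by branch
theorem reqcolor_mem (tc tv c v : String) (rc rv : Option String) :
    ((if pyTruthy rc then pyValues.map (fun value => (rc.getD "", value))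
      else if tv == "A" then pyValues.map (fun value => (tc, value))
      else (if pyTruthy rv then
              (pyColors.map (fun color => (color, rv.getD "")), ([] : List (String × String)))
            else if tv == "J" then
              (([] : List (String × String)), pyValues.map (fun value => (tc, value)))
            else (([] : List (String × String)), ([] : List (String × String)))).2).contains (c, v) = true)
    ↔ ((pyTruthy rc = true ∧ c = rc.getD "" ∧ v ∈ pyValues)
       ∨ (pyTruthy rc = false ∧ tv = "A" ∧ c = tc ∧ v ∈ pyValues)
       ∨ (pyTruthy rc = false ∧ ¬ tv = "A" ∧ pyTruthy rv = false ∧ tv = "J" ∧ c = tc ∧ v ∈ pyValues)) := by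
  split_ifs with h1 h2 h3 h4 <;> simp_all [mem_map_fst, mem_map_snd] <;> tauto

-- membership in A's req_value list
theorem reqvalue_mem (tc tv c v : String) (rv : Option String) :
    (((if pyTruthy rv then
          (pyColors.map (fun color => (color, rv.getD "")), ([] : List (String × String)))
        else if tv == "J" then
          (([] : List (String × String)), pyValues.map (fun value => (tc, value)))
        else (([] : List (String × String)), ([] : List (String × String)))).1).contains (c, v) = true)
    ↔ (pyTruthy rv = true ∧ c ∈ pyColors ∧ v = rv.getD "") := by
  split_ifs with h1 h2 <;> simp_all [mem_map_fst, mem_map_snd] <;> tauto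

-- membership in A's from_color list
theorem fromcolor_mem (tc tv c v : String) :
    (((if (["2", "3", "K"] : List String).contains tv then
          ((["2", "3", "K"] : List String).map (fun value => (tc, value)), true)
        else (([] : List (String × String)), false)).1).contains (c, v) = true)
    ↔ (tv ∈ (["2", "3", "K"] : List String) ∧ c = tc ∧ v ∈ (["2", "3", "K"] : List String)) := by
  split_ifs with h1 <;> simp_all [mem_map_snd] <;> tauto

-- B's per-card predicate, characterised the same way
set_option maxHeartbeats 800000 in
theorem playable_mem (tc tv c v : String) (rc rv : Option String) :
    (pyPlayable tc tv rc rv (c, v) = true)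
    ↔ ((v = tv ∧ c ∈ pyColors)
       ∨ (tv ∈ (["2", "3", "K"] : List String) ∧ c = tc ∧ v ∈ (["2", "3", "K"] : List String))
       ∨ (pyTruthy rv = true ∧ v = rv.getD "" ∧ c ∈ pyColors)
       ∨ (((pyTruthy rc = true ∧ c = rc.getD "")
           ∨ (pyTruthy rc = false ∧ tv = "A" ∧ c = tc)
           ∨ (pyTruthy rc = false ∧ ¬ tv = "A" ∧ tv = "J" ∧ pyTruthy rv = false ∧ c = tc))
          ∧ v ∈ pyValues)) := by
  unfold pyPlayable
  simp only [Bool.if_true_left, Bool.or_eq_true, Bool.and_eq_true, beq_iff_eq,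
    decide_eq_true_eq, Bool.not_eq_true']
  split_ifs with h1 h2 h3 <;> cases hrv : pyTruthy rv <;> simp_all <;> tauto

-- the two per-card decisions agree
set_option maxHeartbeats 800000 in
theorem pred_eq (tc tv : String) (rc rv : Option String) (card : String × String) :
    ((if pyTruthy rc then pyValues.map (fun value => (rc.getD "", value))
      else if tv == "A" then pyValues.map (fun value => (tc, value))
      else (if pyTruthy rv then
              (pyColors.map (fun color => (color, rv.getD "")), ([] : List (String × String)))
            else if tv == "J" then
              (([] : List (String × String)), pyValues.map (fun value => (tc, value)))
            else (([] : List (String × String)), ([] : List (String × String)))).2)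
     ++ (if pyTruthy rv then
           (pyColors.map (fun color => (color, rv.getD "")), ([] : List (String × String)))
         else if tv == "J" then
           (([] : List (String × String)), pyValues.map (fun value => (tc, value)))
         else (([] : List (String × String)), ([] : List (String × String)))).1
     ++ pyColors.map (fun color => (color, tv))
     ++ (if (["2", "3", "K"] : List String).contains tv then
           ((["2", "3", "K"] : List String).map (fun value => (tc, value)), true)
         else (([] : List (String × String)), false)).1).contains card
    = pyPlayable tc tv rc rv card := by
  obtain ⟨c, v⟩ := card
  rw [Bool.eq_iff_iff]
  rw [List.contains_append, List.contains_append, List.contains_append]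
  simp only [Bool.or_eq_true, reqcolor_mem, reqvalue_mem, fromcolor_mem, mem_map_fst, playable_mem]
  tauto

-- ===== VERDICT (by name: the statement is the Claim_ definition above) =====
theorem active_card_possible_plays_spec : Claim_equal_active_card_possible_plays := by
  intro hand top_card requested_color requested_value _
  unfold Spec_active_card_possible_plays
  simp only [active_card_possible_plays, active_card_possible_plays_alt]
  rw [List.filter_congr (fun card _ => pred_eq top_card.1 top_card.2 requested_color requested_value card)]
  cases hK : (["2", "3", "K"] : List String).contains top_card.2 <;> simp [hK]
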